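-- pv_equiv track=rewrite | github.com/PrefLib/preflibtools | tests/properties/subdomains/dichotomous/test_interval.py | generate_NOT_VI_VEI_instances_T3
-- ===== SOURCE A (Python) =====
-- def generate_NOT_VI_VEI_instances_T3(a):
--     # Generate 'a' voters
--     instance = [[] for _ in range(a)]
--
--     # Generate 'a' alternatives
--     alternatives = [i+1 for i in range(a)]
--
--     # Add two alternatives around the diagonal to votes
--     for i in range(a-1):
--         instance[i].append(alternatives[i])
--         instance[i+1].append(alternatives[i])
--
--     # Add second to second to last alternative to all voters except first
--     for i in range(1, a-2):
--         instance[i].append(alternatives[-1])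
--
--     # Add a vote with only last alternative
--     instance.append(alternatives[-1:])
--
--     return instance
-- ===== SOURCE B (Python) =====
-- def generate_NOT_VI_VEI_instances_T3(a):
--     # Single pass: each voter's ballot from closed-form membership rules.
--     def ballot(j):
--         if a == 1:
--             return []
--         if j == 0:
--             return [1]
--         if j == a - 1:
--             return [a - 1]
--         if j <= a - 3:
--             return [j, j + 1, a]
--         return [j, j + 1]
--     rows = [ballot(j) for j in range(a)]
--     rows.append([a] if a >= 1 else [])
--     return rows
-- ===== Notes on version B (the rewrite author's own statement) =====
-- stated objective: simpler
-- what changed: Replaces the two scatter-append loops over a shared mutable list of lists with a single pass that computes each voter's ballot directly from closed-form membership rules, then appends the final [a] voter.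
import Mathlib
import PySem

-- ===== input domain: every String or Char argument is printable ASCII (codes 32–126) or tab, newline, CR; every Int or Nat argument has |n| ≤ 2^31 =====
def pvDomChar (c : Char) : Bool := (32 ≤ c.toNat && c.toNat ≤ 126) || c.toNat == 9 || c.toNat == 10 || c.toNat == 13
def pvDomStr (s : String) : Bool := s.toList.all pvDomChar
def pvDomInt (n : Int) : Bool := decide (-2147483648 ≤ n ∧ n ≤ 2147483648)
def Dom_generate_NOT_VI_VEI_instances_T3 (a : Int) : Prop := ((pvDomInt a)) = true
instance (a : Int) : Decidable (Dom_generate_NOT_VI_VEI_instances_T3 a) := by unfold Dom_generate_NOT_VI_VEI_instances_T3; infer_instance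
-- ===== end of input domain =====

-- B builds each ballot by closed-form membership rules in one pass instead of A's two
-- scatter-append loops over a mutable list of lists; objective: simpler.

-- ===== PORT A =====
-- loop body of 'for i in range(a-1)': instance[i].append(alternatives[i]);
-- instance[i+1].append(alternatives[i]).  i is nonnegative and in range on every executed
-- iteration, so 'inst.set i.toNat (inst.getD i.toNat [] ++ [..])' is exact for the mutation.
def pvA_step1 (alts : List Int) (inst : List (List Int)) (i : Int) : List (List Int) :=
  let inst := inst.set i.toNat (inst.getD i.toNat [] ++ [PySem.List.pyGetD alts i 0])
  inst.set (i+1).toNat (inst.getD (i+1).toNat [] ++ [PySem.List.pyGetD alts i 0])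

-- loop body of 'for i in range(1, a-2)': instance[i].append(alternatives[-1]); exact likewise
-- (alternatives is nonempty whenever this loop runs).
def pvA_step2 (alts : List Int) (inst : List (List Int)) (i : Int) : List (List Int) :=
  inst.set i.toNat (inst.getD i.toNat [] ++ [PySem.List.pyGetD alts (-1) 0])

def generate_NOT_VI_VEI_instances_T3 (a : Int) : List (List Int) :=
  let inst0 : List (List Int) := (PySem.List.pyRange 0 a 1).map (fun _ => [])
  let alternatives : List Int := (PySem.List.pyRange 0 a 1).map (fun i => i + 1)
  let inst1 := (PySem.List.pyRange 0 (a-1) 1).foldl (pvA_step1 alternatives) inst0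
  let inst2 := (PySem.List.pyRange 1 (a-2) 1).foldl (pvA_step2 alternatives) inst1
  inst2 ++ [PySem.List.slice alternatives (some (-1)) none]

-- ===== PORT B =====
def pvB_ballot (a j : Int) : List Int :=
  if a = 1 then []
  else if j = 0 then [1]
  else if j = a - 1 then [a - 1]
  else if j ≤ a - 3 then [j, j + 1, a]
  else [j, j + 1]

def generate_NOT_VI_VEI_instances_T3_alt (a : Int) : List (List Int) :=
  ((PySem.List.pyRange 0 a 1).map (pvB_ballot a)) ++ [if 1 ≤ a then [a] else []]

-- ===== PRECONDITION & SPEC =====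
def Spec_generate_NOT_VI_VEI_instances_T3 (a : Int) (out : List (List Int)) : Prop := out = generate_NOT_VI_VEI_instances_T3_alt a
instance (a : Int) (out : List (List Int)) : Decidable (Spec_generate_NOT_VI_VEI_instances_T3 a out) := by unfold Spec_generate_NOT_VI_VEI_instances_T3; infer_instance

-- ===== CLAIM (what is proved, stated in full; the proofs are below) =====
def Claim_equal_generate_NOT_VI_VEI_instances_T3 : Prop := ∀ (a : Int), Dom_generate_NOT_VI_VEI_instances_T3 a → Spec_generate_NOT_VI_VEI_instances_T3 a (generate_NOT_VI_VEI_instances_T3 a)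



-- ===== LEMMAS AND PROOFS =====

-- ballot of voter j after the first (diagonal) loop has run k iterations
def pvL1 (k j : Nat) : List Int :=
  (if 1 ≤ j ∧ j ≤ k then [(j:Int)] else []) ++ (if j < k then [(j:Int)+1] else [])

-- ballot of voter j after both loops, the second having run t iterations
def pvL2 (n t j : Nat) : List Int :=
  pvL1 (n-1) j ++ (if 1 ≤ j ∧ j ≤ t then [(n:Int)] else [])

theorem pv_pyRange_map {α : Type} (n : Nat) (f : Int → α) :
    (PySem.List.pyRange 0 (n:Int) 1).map f = (List.range n).map (fun k : Nat => f (k:Int)) := by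
  rw [PySem.List.pyRange_one]
  simp only [List.map_map, sub_zero, Int.toNat_natCast]
  exact List.map_congr_left (fun k _ => by simp)

theorem pv_getD_map_range {α : Type} (n i : Nat) (f : Nat → α) (d : α) (hi : i < n) :
    ((List.range n).map f).getD i d = f i := by
  rw [List.getD_eq_getElem?_getD]
  simp [hi]

theorem pv_set_map_range {α : Type} (n i : Nat) (f : Nat → α) (v : α) :
    ((List.range n).map f).set i v = (List.range n).map (fun j => if j = i then v else f j) := by
  apply List.ext_getElem
  · simp
  · intro j hj hj'
    simp only [List.getElem_set, List.getElem_map, List.getElem_range]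
    by_cases h : j = i
    · simp [h]
    · rw [if_neg (fun h' => h h'.symm), if_neg h]

theorem pv_loop1 (n k : Nat) (hn : 1 ≤ n) (hk : k ≤ n - 1) :
    (PySem.List.pyRange 0 (k:Int) 1).foldl
      (pvA_step1 ((PySem.List.pyRange 0 (n:Int) 1).map (fun i => i + 1)))
      ((PySem.List.pyRange 0 (n:Int) 1).map (fun _ => [])) = (List.range n).map (pvL1 k) := by
  induction k with
  | zero =>
    simp only [Nat.cast_zero]
    rw [PySem.List.pyRange_one_eq_nil (le_refl 0), List.foldl_nil, pv_pyRange_map]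
    refine List.map_congr_left ?_
    intro j hj
    simp only [pvL1]
    rw [if_neg (by omega), if_neg (by omega)]
    rfl
  | succ k ih =>
    have hk' : k ≤ n - 1 := by omega
    have hkn : k < n := by omega
    have hkn1 : k + 1 < n := by omega
    have hcast : ((k+1:Nat):Int) = (k:Int) + 1 := by push_cast; ring
    rw [hcast, PySem.List.pyRange_one_succ_right (by omega), List.foldl_append,
      ih hk', List.foldl_cons, List.foldl_nil]
    unfold pvA_step1
    have htn : ((k:Int)).toNat = k := Int.toNat_natCast k
    have htn1 : ((k:Int)+1).toNat = k + 1 := by omega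
    have halt : PySem.List.pyGetD ((PySem.List.pyRange 0 (n:Int) 1).map (fun i => i + 1)) (k:Int) 0
        = (k:Int) + 1 := by
      rw [PySem.List.pyGetD_map_pyRange_of_nonneg _ _ _ _ (by omega) (by exact_mod_cast hkn)]
    simp only [htn, htn1, halt]
    rw [pv_getD_map_range n k _ _ hkn, pv_set_map_range,
      pv_getD_map_range n (k+1) _ _ hkn1, pv_set_map_range]
    refine List.map_congr_left ?_
    intro j hj
    simp only [List.mem_range] at hj
    simp only [pvL1]
    split_ifs <;>
      first
        | rfl
        | (exfalso; omega)
        | (push_cast; simp; done)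
        | (push_cast; simp; omega)

theorem pv_alts_last (n : Nat) (hn : 1 ≤ n) :
    PySem.List.pyGetD ((PySem.List.pyRange 0 (n:Int) 1).map (fun i => i + 1)) (-1) 0 = (n:Int) := by
  rw [pv_pyRange_map]
  rw [show ((-1:Int)) = -((1:Nat):Int) by norm_num]
  rw [PySem.List.pyGetD_neg_natCast _ _ _ (by omega) (by simp; omega)]
  simp only [List.length_map, List.length_range, List.getElem_map, List.getElem_range]
  omega

theorem pv_loop2 (n t : Nat) (hn : 1 ≤ n) (ht : t ≤ n - 3) :
    (PySem.List.pyRange 1 (1 + (t:Int)) 1).foldl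
      (pvA_step2 ((PySem.List.pyRange 0 (n:Int) 1).map (fun i => i + 1)))
      ((List.range n).map (pvL1 (n-1))) = (List.range n).map (pvL2 n t) := by
  induction t with
  | zero =>
    simp only [Nat.cast_zero, add_zero]
    rw [PySem.List.pyRange_one_eq_nil (le_refl 1), List.foldl_nil]
    refine List.map_congr_left ?_
    intro j hj
    simp only [pvL2]
    rw [if_neg (by omega)]
    simp
  | succ t ih =>
    have ht' : t ≤ n - 3 := by omega
    have htn : t + 1 < n := by omega
    have hcast : (1 + ((t+1:Nat):Int)) = (1 + (t:Int)) + 1 := by push_cast; ring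
    rw [hcast, PySem.List.pyRange_one_succ_right (by omega), List.foldl_append,
      ih ht', List.foldl_cons, List.foldl_nil]
    unfold pvA_step2
    have htoNat : (1 + (t:Int)).toNat = t + 1 := by omega
    rw [pv_alts_last n hn]
    simp only [htoNat]
    rw [pv_getD_map_range n (t+1) _ _ htn, pv_set_map_range]
    refine List.map_congr_left ?_
    intro j hj
    simp only [List.mem_range] at hj
    simp only [pvL2, pvL1]
    split_ifs <;>
      first
        | rfl
        | (exfalso; omega)
        | (push_cast; simp; done)
        | (push_cast; simp; omega)

theorem pv_drop_last {α : Type} (n : Nat) (hn : 1 ≤ n) (f : Nat → α) :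
    ((List.range n).map f).drop (n - 1) = [f (n-1)] := by
  obtain ⟨m, rfl⟩ : ∃ m, n = m + 1 := ⟨n - 1, by omega⟩
  rw [List.range_succ, List.map_append, List.drop_left' (by simp)]
  simp

-- A's result for a = n ≥ 1, in closed form
theorem pv_A_closed (n : Nat) (hn : 1 ≤ n) :
    generate_NOT_VI_VEI_instances_T3 (n:Int)
      = (List.range n).map (pvL2 n (n-3)) ++ [[(n:Int)]] := by
  show (let inst0 : List (List Int) := (PySem.List.pyRange 0 (n:Int) 1).map (fun _ => []);
    let alternatives : List Int := (PySem.List.pyRange 0 (n:Int) 1).map (fun i => i + 1);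
    let inst1 := (PySem.List.pyRange 0 ((n:Int)-1) 1).foldl (pvA_step1 alternatives) inst0;
    let inst2 := (PySem.List.pyRange 1 ((n:Int)-2) 1).foldl (pvA_step2 alternatives) inst1;
    inst2 ++ [PySem.List.slice alternatives (some (-1)) none]) = _
  simp only []
  have h1 : ((n:Int) - 1) = ((n-1:Nat):Int) := by omega
  have hrange2 : PySem.List.pyRange 1 ((n:Int) - 2) 1
      = PySem.List.pyRange 1 (1 + ((n-3:Nat):Int)) 1 := by
    by_cases h3 : 3 ≤ n
    · congr 1; omega
    · rw [PySem.List.pyRange_one_eq_nil (by omega), PySem.List.pyRange_one_eq_nil (by omega)]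
  rw [h1, pv_loop1 n (n-1) hn (le_refl _), hrange2, pv_loop2 n (n-3) hn (le_refl _)]
  congr 1
  rw [PySem.List.slice_from_neg_one, pv_pyRange_map]
  simp only [List.length_map, List.length_range]
  rw [pv_drop_last n hn]
  have : ((n-1:Nat):Int) + 1 = (n:Int) := by omega
  simp [this]

-- B's result for a = n ≥ 1, in the same shape
theorem pv_B_closed (n : Nat) (hn : 1 ≤ n) :
    generate_NOT_VI_VEI_instances_T3_alt (n:Int)
      = (List.range n).map (fun j : Nat => pvB_ballot (n:Int) (j:Int)) ++ [[(n:Int)]] := by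
  unfold generate_NOT_VI_VEI_instances_T3_alt
  rw [pv_pyRange_map, if_pos (by exact_mod_cast hn)]

theorem pv_ballot_eq (n j : Nat) (hn : 1 ≤ n) (hj : j < n) :
    pvL2 n (n-3) j = pvB_ballot (n:Int) (j:Int) := by
  unfold pvL2 pvL1 pvB_ballot
  split_ifs <;>
    first
      | rfl
      | (exfalso; omega)
      | (push_cast; simp; done)
      | (push_cast; simp; omega)
      | omega

-- ===== VERDICT (by name: the statement is the Claim_ definition above) =====
theorem generate_NOT_VI_VEI_instances_T3_spec : Claim_equal_generate_NOT_VI_VEI_instances_T3 := by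
  intro a _
  unfold Spec_generate_NOT_VI_VEI_instances_T3
  by_cases ha : a ≤ 0
  · show (let inst0 : List (List Int) := (PySem.List.pyRange 0 a 1).map (fun _ => []);
      let alternatives : List Int := (PySem.List.pyRange 0 a 1).map (fun i => i + 1);
      let inst1 := (PySem.List.pyRange 0 (a-1) 1).foldl (pvA_step1 alternatives) inst0;
      let inst2 := (PySem.List.pyRange 1 (a-2) 1).foldl (pvA_step2 alternatives) inst1;
      inst2 ++ [PySem.List.slice alternatives (some (-1)) none]) = _
    simp only []
    unfold generate_NOT_VI_VEI_instances_T3_alt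
    rw [PySem.List.pyRange_one_eq_nil (by omega : a ≤ 0),
      PySem.List.pyRange_one_eq_nil (by omega : a - 1 ≤ 0),
      PySem.List.pyRange_one_eq_nil (by omega : a - 2 ≤ 1)]
    rw [if_neg (by omega : ¬ (1:Int) ≤ a)]
    simp [PySem.List.slice_some_none]
  · obtain ⟨n, rfl⟩ : ∃ n : Nat, a = (n:Int) := ⟨a.toNat, by omega⟩
    have hn : 1 ≤ n := by omega
    rw [pv_A_closed n hn, pv_B_closed n hn]
    congr 1
    refine List.map_congr_left ?_
    intro j hj
    exact pv_ballot_eq n j hn (List.mem_range.mp hj)
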